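-- pv_equiv track=rewrite | github.com/CamoGuy3000/ChessStuff | devinTesting/algorithms.py | simple_straight_path
-- ===== SOURCE A (Python) =====
-- from typing import List, Tuple
--
-- Position = Tuple[int, int]
--
-- def simple_straight_path(start: Position, end: Position) -> List[Position]:
--     """
--     Moves in a straight line first along rows, then columns (or vice versa).
--     Avoids diagonal movement.
--     """
--     path = []
--     r1, c1 = start
--     r2, c2 = end
--
--     # Move vertically first
--     step = 1 if r2 > r1 else -1
--     for r in range(r1, r2, step):
--         path.append((r, c1))
--
--     # Move horizontally
--     step = 1 if c2 > c1 else -1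
--     for c in range(c1, c2 + step, step):
--         path.append((r2, c))
--
--     return path
-- ===== SOURCE B (Python) =====
-- from typing import List, Tuple
--
-- Position = Tuple[int, int]
--
-- def simple_straight_path(start: Position, end: Position) -> List[Position]:
--     """Step-by-step walker: move row-wise to the target row, then column-wise."""
--     r, c = start
--     r2, c2 = end
--     rstep = 1 if r2 > r else -1
--     cstep = 1 if c2 > c else -1
--     path = []
--     while True:
--         path.append((r, c))
--         if r != r2:
--             r += rstep
--         elif c != c2:
--             c += cstep
--         else:
--             break
--     return path
-- ===== Notes on version B (the rewrite author's own statement) =====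
-- stated objective: alternative
-- what changed: Replaced the two counted range loops (row range excluding the end row, then an inclusive column range) with a single while-True step walker that keeps mutable (r, c), appends each cell and moves one step toward the target row, then the target column, breaking at the end cell.
import Mathlib
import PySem

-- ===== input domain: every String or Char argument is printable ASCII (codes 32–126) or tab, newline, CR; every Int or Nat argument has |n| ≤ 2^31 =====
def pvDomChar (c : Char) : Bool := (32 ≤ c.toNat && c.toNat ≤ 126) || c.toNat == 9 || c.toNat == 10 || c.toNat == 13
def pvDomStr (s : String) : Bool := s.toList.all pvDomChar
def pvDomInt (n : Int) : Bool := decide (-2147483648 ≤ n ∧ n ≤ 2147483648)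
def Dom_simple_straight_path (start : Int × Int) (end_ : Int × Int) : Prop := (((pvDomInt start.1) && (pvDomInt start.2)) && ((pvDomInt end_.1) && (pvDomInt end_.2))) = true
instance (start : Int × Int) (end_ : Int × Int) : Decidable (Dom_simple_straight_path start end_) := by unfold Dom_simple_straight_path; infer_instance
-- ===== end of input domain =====

-- B replaces A's two counted range loops by a single step-by-step walker over (r, c); alternative decomposition, same cost.

-- ===== PORT A =====
def simple_straight_path (start : Int × Int) (end_ : Int × Int) : List (Int × Int) :=
  let r1 := start.1
  let c1 := start.2
  let r2 := end_.1
  let c2 := end_.2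
  -- Move vertically first
  let step : Int := if r2 > r1 then 1 else -1
  let path := (PySem.List.pyRange r1 r2 step).foldl (fun p r => p ++ [(r, c1)]) []
  -- Move horizontally
  let step2 : Int := if c2 > c1 then 1 else -1
  (PySem.List.pyRange c1 (c2 + step2) step2).foldl (fun p c => p ++ [(r2, c)]) path

-- ===== PORT B =====
-- B's 'while True' walker; the fuel bound only makes the same computation total (it is
-- large enough that the walker always breaks before the fuel runs out).
def pvWalk (r2 c2 rstep cstep : Int) : Nat → Int → Int → List (Int × Int)
  | 0, _, _ => []
  | fuel + 1, r, c =>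
    (r, c) :: (if r ≠ r2 then pvWalk r2 c2 rstep cstep fuel (r + rstep) c
               else if c ≠ c2 then pvWalk r2 c2 rstep cstep fuel r (c + cstep)
               else [])

def simple_straight_path_alt (start : Int × Int) (end_ : Int × Int) : List (Int × Int) :=
  let r := start.1
  let c := start.2
  let r2 := end_.1
  let c2 := end_.2
  let rstep : Int := if r2 > r then 1 else -1
  let cstep : Int := if c2 > c then 1 else -1
  pvWalk r2 c2 rstep cstep ((r2 - r).natAbs + (c2 - c).natAbs + 1) r c

-- ===== PRECONDITION & SPEC =====
def Spec_simple_straight_path (start : Int × Int) (end_ : Int × Int) (out : List (Int × Int)) : Prop := out = simple_straight_path_alt start end_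
instance (start : Int × Int) (end_ : Int × Int) (out : List (Int × Int)) : Decidable (Spec_simple_straight_path start end_ out) := by unfold Spec_simple_straight_path; infer_instance

-- ===== CLAIM (what is proved, stated in full; the proofs are below) =====
def Claim_equal_simple_straight_path : Prop := ∀ (start : Int × Int) (end_ : Int × Int), Dom_simple_straight_path start end_ → Spec_simple_straight_path start end_ (simple_straight_path start end_)

-- ===== LEMMAS AND PROOFS =====

-- Column phase, increasing: once r = r2, the walker with cstep = 1 emits the inclusive range c..c2.
theorem pvWalk_col_up (r2 c2 rs : Int) (c : Int) (fuel : Nat)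
    (h : c ≤ c2) (hf : (c2 - c).natAbs < fuel) :
    pvWalk r2 c2 rs 1 fuel r2 c = (PySem.List.pyRange c (c2 + 1) 1).map (fun x => (r2, x)) := by
  induction fuel generalizing c with
  | zero => omega
  | succ n ih =>
    by_cases hc : c = c2
    · subst hc
      simp [pvWalk, PySem.List.pyRange_one_singleton]
    · rw [PySem.List.pyRange_one_cons (by omega)]
      simp only [List.map_cons, pvWalk]
      rw [ih (c + 1) (by omega) (by omega)]
      simp [hc]

-- Column phase, decreasing: once r = r2, the walker with cstep = -1 emits the inclusive countdown c..c2.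
theorem pvWalk_col_down (r2 c2 rs : Int) (c : Int) (fuel : Nat)
    (h : c2 ≤ c) (hf : (c - c2).natAbs < fuel) :
    pvWalk r2 c2 rs (-1) fuel r2 c = (PySem.List.pyRange c (c2 - 1) (-1)).map (fun x => (r2, x)) := by
  induction fuel generalizing c with
  | zero => omega
  | succ n ih =>
    rw [PySem.List.pyRange_neg_one_cons (by omega)]
    by_cases hc : c = c2
    · subst hc
      rw [PySem.List.pyRange_neg_one_eq_nil (by omega)]
      simp [pvWalk]
    · simp only [List.map_cons, pvWalk]
      rw [show c - 1 = c + -1 from by ring, ih (c + -1) (by omega) (by omega)]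
      simp [hc]

-- Row phase, increasing: the walker with rstep = 1 emits the half-open range r..r2-1 paired with c,
-- then continues from (r2, c) with the remaining fuel.
theorem pvWalk_row_up (r2 c2 cs : Int) (r c : Int) (n g : Nat)
    (hn : (r2 - r).natAbs = n) (h : r ≤ r2) :
    pvWalk r2 c2 1 cs (n + g) r c =
      (PySem.List.pyRange r r2 1).map (fun x => (x, c)) ++ pvWalk r2 c2 1 cs g r2 c := by
  induction n generalizing r with
  | zero =>
    obtain rfl : r = r2 := by omega
    simp [PySem.List.pyRange_one_eq_nil (le_refl r)]
  | succ m ih =>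
    have hr : r < r2 := by omega
    rw [PySem.List.pyRange_one_cons hr]
    rw [show m + 1 + g = (m + g) + 1 from by omega]
    simp only [pvWalk, List.map_cons, List.cons_append]
    rw [ih (r + 1) (by omega) (by omega)]
    simp [show r ≠ r2 from by omega]

-- Row phase, decreasing.
theorem pvWalk_row_down (r2 c2 cs : Int) (r c : Int) (n g : Nat)
    (hn : (r - r2).natAbs = n) (h : r2 ≤ r) :
    pvWalk r2 c2 (-1) cs (n + g) r c =
      (PySem.List.pyRange r r2 (-1)).map (fun x => (x, c)) ++ pvWalk r2 c2 (-1) cs g r2 c := by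
  induction n generalizing r with
  | zero =>
    obtain rfl : r = r2 := by omega
    simp [PySem.List.pyRange_neg_one_eq_nil (le_refl r)]
  | succ m ih =>
    have hr : r2 < r := by omega
    rw [PySem.List.pyRange_neg_one_cons hr]
    rw [show m + 1 + g = (m + g) + 1 from by omega]
    simp only [pvWalk, List.map_cons, List.cons_append]
    rw [show r - 1 = r + -1 from by ring, ih (r + -1) (by omega) (by omega)]
    simp [show r ≠ r2 from by omega]

-- ===== VERDICT (by name: the statement is the Claim_ definition above) =====
theorem simple_straight_path_spec : Claim_equal_simple_straight_path := by
  intro start end_ _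
  obtain ⟨r1, c1⟩ := start
  obtain ⟨r2, c2⟩ := end_
  unfold Spec_simple_straight_path simple_straight_path simple_straight_path_alt
  simp only []
  rw [PySem.List.foldl_append_singleton_eq_map, PySem.List.foldl_append_singleton_eq_map,
      List.nil_append]
  rw [show (r2 - r1).natAbs + (c2 - c1).natAbs + 1 = (r2 - r1).natAbs + ((c2 - c1).natAbs + 1) from by omega]
  by_cases hr : r2 > r1 <;> by_cases hc : c2 > c1 <;> simp only [hr, hc, if_true, if_false]
  · rw [pvWalk_row_up r2 c2 1 r1 c1 (r2 - r1).natAbs ((c2 - c1).natAbs + 1) rfl (by omega),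
        pvWalk_col_up r2 c2 1 c1 _ (by omega) (by omega)]
  · rw [pvWalk_row_up r2 c2 (-1) r1 c1 (r2 - r1).natAbs ((c2 - c1).natAbs + 1) rfl (by omega)]
    rw [show (c2 - c1).natAbs = (c1 - c2).natAbs from by omega,
        pvWalk_col_down r2 c2 1 c1 _ (by omega) (by omega)]
    rw [show c2 + -1 = c2 - 1 from by ring]
  · rw [show (r2 - r1).natAbs = (r1 - r2).natAbs from by omega,
        pvWalk_row_down r2 c2 1 r1 c1 (r1 - r2).natAbs ((c2 - c1).natAbs + 1) rfl (by omega),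
        pvWalk_col_up r2 c2 (-1) c1 _ (by omega) (by omega)]
  · rw [show (r2 - r1).natAbs = (r1 - r2).natAbs from by omega,
        pvWalk_row_down r2 c2 (-1) r1 c1 (r1 - r2).natAbs ((c2 - c1).natAbs + 1) rfl (by omega)]
    rw [show (c2 - c1).natAbs = (c1 - c2).natAbs from by omega,
        pvWalk_col_down r2 c2 (-1) c1 _ (by omega) (by omega)]
    rw [show c2 + -1 = c2 - 1 from by ring]
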